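-- pv_equiv track=rewrite | github.com/phenixnull/VideoCaption | projects/semantic_iscr_caption/eval_structured_iscr_rerank.py | _contains_token_subsequence
-- ===== SOURCE A (Python) =====
-- from typing import Dict, List, Optional, Sequence, Set, Tuple
--
-- def _contains_token_subsequence(seq_tokens: Sequence[int], unit_tokens: Sequence[int]) -> bool:
--     if not unit_tokens or len(seq_tokens) < len(unit_tokens):
--         return False
--     unit_len = len(unit_tokens)
--     head = int(unit_tokens[0])
--     for start, token in enumerate(seq_tokens):
--         if int(token) != head:
--             continue
--         if [int(t) for t in seq_tokens[start : start + unit_len]] == [int(t) for t in unit_tokens]: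
--             return True
--     return False
-- ===== SOURCE B (Python) =====
-- def _contains_token_subsequence(seq_tokens, unit_tokens):
--     unit = [int(t) for t in unit_tokens]
--     if not unit:
--         return False
--     m = len(unit)
--     # One left-to-right pass simulating the prefix-matching NFA: `active`
--     # holds the lengths of all prefixes of `unit` that end at the current
--     # position of the scan.  No slicing, no backtracking.
--     active = []
--     for tok in seq_tokens:
--         c = int(tok)
--         active = [j + 1 for j in active + [0] if unit[j] == c]
--         if m in active:
--             return True
--     return False
-- ===== Notes on version B (the rewrite author's own statement) =====
-- stated objective: alternative
-- what changed: Replaced the start-index scan with a per-candidate slice comparison by a single left-to-right pass that maintains the list of prefix-match lengths of unit_tokens ending at the current position (NFA simulation): no slicing, no restart from each candidate start.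
import Mathlib
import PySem

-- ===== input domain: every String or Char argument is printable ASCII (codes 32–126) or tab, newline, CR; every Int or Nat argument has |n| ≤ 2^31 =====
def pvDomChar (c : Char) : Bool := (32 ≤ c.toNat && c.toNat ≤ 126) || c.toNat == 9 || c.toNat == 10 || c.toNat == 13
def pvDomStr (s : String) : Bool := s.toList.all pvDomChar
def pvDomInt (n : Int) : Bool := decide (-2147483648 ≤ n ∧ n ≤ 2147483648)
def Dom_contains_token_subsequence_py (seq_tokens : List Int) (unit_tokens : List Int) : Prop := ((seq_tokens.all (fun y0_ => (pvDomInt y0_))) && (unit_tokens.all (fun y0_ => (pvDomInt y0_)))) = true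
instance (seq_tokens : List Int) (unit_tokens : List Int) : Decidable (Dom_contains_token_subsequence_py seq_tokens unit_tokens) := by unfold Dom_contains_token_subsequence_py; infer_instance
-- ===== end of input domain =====

-- B replaces A's start-index scan with per-candidate slice comparison by a single
-- left-to-right pass maintaining the list of prefix-match lengths of unit_tokens
-- ending at the current position (NFA simulation); objective: alternative algorithm.

-- ===== PORT A =====
-- for start, token in enumerate(seq_tokens): … (start carried as a counter)
def ctsALoop (seq_tokens unit_tokens : List Int) (unit_len : Nat) (head : Int) : Nat → List Int → Bool
  | _, [] => false
  | start, token :: rest =>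
    if token ≠ head then ctsALoop seq_tokens unit_tokens unit_len head (start + 1) rest
    else if PySem.List.slice seq_tokens (some (start : Int)) (some ((start : Int) + (unit_len : Int))) = unit_tokens then
      true
    else ctsALoop seq_tokens unit_tokens unit_len head (start + 1) rest

def contains_token_subsequence_py (seq_tokens : List Int) (unit_tokens : List Int) : Bool :=
  if unit_tokens = [] ∨ seq_tokens.length < unit_tokens.length then false
  else ctsALoop seq_tokens unit_tokens unit_tokens.length unit_tokens.headI 0 seq_tokens

-- ===== PORT B =====
-- active = [j + 1 for j in active + [0] if unit[j] == c]
def ctsAltStep (unit : List Int) (active : List Int) (c : Int) : List Int :=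
  (active ++ [0]).filterMap (fun j => if PySem.List.pyGet? unit j = some c then some (j + 1) else none)

def ctsAltLoop (unit : List Int) (m : Int) (active : List Int) : List Int → Bool
  | [] => false
  | tok :: rest =>
    let active' := ctsAltStep unit active tok
    if m ∈ active' then true else ctsAltLoop unit m active' rest

def contains_token_subsequence_py_alt (seq_tokens : List Int) (unit_tokens : List Int) : Bool :=
  if unit_tokens = [] then false
  else ctsAltLoop unit_tokens (unit_tokens.length : Int) [] seq_tokens

-- ===== PRECONDITION & SPEC =====
def Spec_contains_token_subsequence_py (seq_tokens : List Int) (unit_tokens : List Int) (out : Bool) : Prop := out = contains_token_subsequence_py_alt seq_tokens unit_tokens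
instance (seq_tokens : List Int) (unit_tokens : List Int) (out : Bool) : Decidable (Spec_contains_token_subsequence_py seq_tokens unit_tokens out) := by unfold Spec_contains_token_subsequence_py; infer_instance

-- ===== CLAIM (what is proved, stated in full; the proofs are below) =====
def Claim_equal_contains_token_subsequence_py : Prop := ∀ (seq_tokens : List Int) (unit_tokens : List Int), Dom_contains_token_subsequence_py seq_tokens unit_tokens → Spec_contains_token_subsequence_py seq_tokens unit_tokens (contains_token_subsequence_py seq_tokens unit_tokens)

-- ===== LEMMAS AND PROOFS =====

theorem pv_suffix_snoc_iff {α : Type} (x h : List α) (y c : α) :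
    x ++ [y] <:+ h ++ [c] ↔ x <:+ h ∧ y = c := by
  constructor
  · rintro ⟨p, hp⟩
    have hp' : (p ++ x).concat y = h.concat c := by
      simpa [List.concat_eq_append, List.append_assoc] using hp
    obtain ⟨h1, h2⟩ := List.concat_inj.mp hp'
    exact ⟨⟨p, h1⟩, h2⟩
  · rintro ⟨⟨p, hp⟩, rfl⟩
    exact ⟨p, by rw [← hp]; simp [List.append_assoc]⟩

theorem pv_infix_snoc_iff {α : Type} (u h : List α) (c : α) :
    u <:+: h ++ [c] ↔ u <:+: h ∨ u <:+ h ++ [c] := by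
  constructor
  · rintro ⟨a, b, hab⟩
    rcases List.eq_nil_or_concat b with rfl | ⟨b', y, rfl⟩
    · exact Or.inr ⟨a, by simpa using hab⟩
    · have hab' : (a ++ u ++ b').concat y = h.concat c := by
        simpa [List.concat_eq_append, List.append_assoc] using hab
      obtain ⟨h1, _⟩ := List.concat_inj.mp hab'
      exact Or.inl ⟨a, b', h1⟩
  · rintro (hinf | hsuf)
    · exact hinf.trans ⟨[], [c], by simp⟩
    · exact hsuf.isInfix

theorem pv_take_succ_suffix_snoc (u h : List Int) (c : Int) (k : Nat) (hk : k < u.length) :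
    u.take (k + 1) <:+ h ++ [c] ↔ u.take k <:+ h ∧ u[k]? = some c := by
  have htake : u.take (k + 1) = u.take k ++ [u[k]] := by
    rw [List.take_add_one, List.getElem?_eq_getElem hk]
    rfl
  rw [htake, pv_suffix_snoc_iff, List.getElem?_eq_getElem hk]
  simp

theorem pv_step_mem (u active : List Int) (c : Int) (h : List Int)
    (hinv : ∀ j : Int, j ∈ active ↔ ∃ k : Nat, j = (k : Int) ∧ 0 < k ∧ k < u.length ∧ u.take k <:+ h) :
    ∀ j : Int, j ∈ ctsAltStep u active c ↔
      ∃ k : Nat, j = (k : Int) ∧ 0 < k ∧ k ≤ u.length ∧ u.take k <:+ h ++ [c] := by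
  intro j
  unfold ctsAltStep
  simp only [List.mem_filterMap, List.mem_append, List.mem_singleton]
  constructor
  · rintro ⟨j₀, hj₀, hf⟩
    by_cases hc : PySem.List.pyGet? u j₀ = some c
    · simp only [hc, if_pos, Option.some.injEq] at hf
      -- j₀ is a nonnegative cast: either 0 or from the invariant
      have hj₀' : ∃ k₀ : Nat, j₀ = (k₀ : Int) ∧ u.take k₀ <:+ h := by
        rcases hj₀ with hmem | rfl
        · obtain ⟨k₀, rfl, _, _, hs⟩ := (hinv j₀).mp hmem
          exact ⟨k₀, rfl, hs⟩
        · exact ⟨0, by simp, by simp⟩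
      obtain ⟨k₀, rfl, hs⟩ := hj₀'
      rw [PySem.List.pyGet?_natCast] at hc
      have hk₀ : k₀ < u.length := by
        by_contra hge
        rw [List.getElem?_eq_none (by omega)] at hc
        simp at hc
      refine ⟨k₀ + 1, by push_cast; omega, by omega, by omega, ?_⟩
      exact (pv_take_succ_suffix_snoc u h c k₀ hk₀).mpr ⟨hs, hc⟩
    · simp [hc] at hf
  · rintro ⟨k, rfl, hk, hkm, hsuf⟩
    obtain ⟨k₀, rfl⟩ : ∃ k₀ : Nat, k = k₀ + 1 := ⟨k - 1, by omega⟩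
    have hk₀ : k₀ < u.length := by omega
    obtain ⟨hs, hget⟩ := (pv_take_succ_suffix_snoc u h c k₀ hk₀).mp hsuf
    refine ⟨(k₀ : Int), ?_, ?_⟩
    · rcases Nat.eq_zero_or_pos k₀ with rfl | hpos
      · right; simp
      · left; exact (hinv (k₀ : Int)).mpr ⟨k₀, rfl, hpos, hk₀, hs⟩
    · rw [PySem.List.pyGet?_natCast, hget, if_pos rfl]
      congr 1

theorem pv_bloop_iff (u : List Int) (hu : u ≠ []) :
    ∀ (rest h active : List Int),
      (∀ j : Int, j ∈ active ↔ ∃ k : Nat, j = (k : Int) ∧ 0 < k ∧ k < u.length ∧ u.take k <:+ h) →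
      ¬ u <:+: h →
      (ctsAltLoop u (u.length : Int) active rest = true ↔ u <:+: (h ++ rest)) := by
  intro rest
  induction rest with
  | nil =>
    intro h active _ hocc
    simp [ctsAltLoop, hocc]
  | cons tok rest ih =>
    intro h active hinv hocc
    have hstep := pv_step_mem u active tok h hinv
    by_cases hm : (u.length : Int) ∈ ctsAltStep u active tok
    · have hsuf : u <:+ h ++ [tok] := by
        obtain ⟨k, hk, _, hkm, hs⟩ := (hstep _).mp hm
        have : k = u.length := by exact_mod_cast hk.symm
        subst this
        simpa using hs
      have hinf : u <:+: h ++ tok :: rest := by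
        have : u <:+: (h ++ [tok]) ++ rest := hsuf.isInfix.trans ⟨[], rest, by simp⟩
        simpa [List.append_assoc] using this
      simp [ctsAltLoop, hm, hinf]
    · have hinv' : ∀ j : Int, j ∈ ctsAltStep u active tok ↔
          ∃ k : Nat, j = (k : Int) ∧ 0 < k ∧ k < u.length ∧ u.take k <:+ h ++ [tok] := by
        intro j
        rw [hstep j]
        constructor
        · rintro ⟨k, rfl, hk, hkm, hs⟩
          rcases Nat.lt_or_ge k u.length with hlt | hge
          · exact ⟨k, rfl, hk, hlt, hs⟩
          · have hke : k = u.length := by omega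
            subst hke
            exact absurd ((hstep _).mpr ⟨u.length, rfl, hk, le_refl _, hs⟩) hm
        · rintro ⟨k, rfl, hk, hkm, hs⟩
          exact ⟨k, rfl, hk, by omega, hs⟩
      have hocc' : ¬ u <:+: h ++ [tok] := by
        intro hcon
        rcases (pv_infix_snoc_iff u h tok).mp hcon with hx | hx
        · exact hocc hx
        · have hpos : 0 < u.length := List.length_pos_of_ne_nil hu
          exact hm ((hstep _).mpr ⟨u.length, rfl, hpos, le_refl _, by simpa using hx⟩)
      have := ih (h ++ [tok]) (ctsAltStep u active tok) hinv' hocc'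
      simp only [ctsAltLoop, hm, if_false]
      rw [this]
      simp [List.append_assoc]

theorem pv_alt_iff (s u : List Int) :
    contains_token_subsequence_py_alt s u = true ↔ u ≠ [] ∧ u <:+: s := by
  unfold contains_token_subsequence_py_alt
  by_cases hu : u = []
  · simp [hu]
  · have hinv : ∀ j : Int, j ∈ ([] : List Int) ↔
        ∃ k : Nat, j = (k : Int) ∧ 0 < k ∧ k < u.length ∧ u.take k <:+ ([] : List Int) := by
      intro j
      simp only [List.not_mem_nil, false_iff]
      rintro ⟨k, rfl, hk, hkm, hs⟩
      have h0 : u.take k = [] := List.suffix_nil.mp hs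
      have hlen0 : min k u.length = 0 := by
        simpa [List.length_take] using congrArg List.length h0
      omega
    have hocc : ¬ u <:+: ([] : List Int) := fun hcon => hu (List.infix_nil.mp hcon)
    rw [if_neg hu, pv_bloop_iff u hu s [] [] hinv hocc]
    simp [hu]

theorem pv_aloop_iff (s u : List Int) (m : Nat) (head : Int) :
    ∀ (rest : List Int) (i : Nat), s.drop i = rest →
      (ctsALoop s u m head i rest = true ↔
        ∃ j : Nat, i ≤ j ∧ s[j]? = some head ∧ (s.drop j).take m = u) := by
  intro rest
  induction rest with
  | nil =>
    intro i hdrop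
    simp only [ctsALoop, Bool.false_eq_true, false_iff]
    rintro ⟨j, hij, hj, _⟩
    have hjlen : j < s.length := by
      rcases List.getElem?_eq_some_iff.mp hj with ⟨hlt, _⟩
      exact hlt
    have : s.length ≤ i := List.drop_eq_nil_iff.mp hdrop
    omega
  | cons t rest ih =>
    intro i hdrop
    have hi : s[i]? = some t := by
      rw [← List.head?_drop, hdrop]; rfl
    have hdrop' : s.drop (i + 1) = rest := by
      rw [← List.tail_drop, hdrop]; rfl
    simp only [ctsALoop]
    rw [PySem.List.slice_natCast_add]
    by_cases ht : t = head
    · subst ht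
      rw [if_neg (by simp)]
      by_cases hsl : (s.drop i).take m = u
      · rw [if_pos hsl]
        exact iff_of_true rfl ⟨i, le_refl _, hi, hsl⟩
      · rw [if_neg hsl, ih (i + 1) hdrop']
        constructor
        · rintro ⟨j, hij, hj, hjs⟩
          exact ⟨j, by omega, hj, hjs⟩
        · rintro ⟨j, hij, hj, hjs⟩
          refine ⟨j, ?_, hj, hjs⟩
          rcases Nat.eq_or_lt_of_le hij with rfl | h
          · exact absurd hjs hsl
          · omega
    · rw [if_pos ht, ih (i + 1) hdrop']
      constructor
      · rintro ⟨j, hij, hj, hjs⟩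
        exact ⟨j, by omega, hj, hjs⟩
      · rintro ⟨j, hij, hj, hjs⟩
        refine ⟨j, ?_, hj, hjs⟩
        rcases Nat.eq_or_lt_of_le hij with rfl | h
        · rw [hi] at hj
          exact absurd (Option.some_inj.mp hj) ht
        · omega

theorem pv_a_iff (s u : List Int) :
    contains_token_subsequence_py s u = true ↔ u ≠ [] ∧ u <:+: s := by
  unfold contains_token_subsequence_py
  by_cases hguard : u = [] ∨ s.length < u.length
  · rw [if_pos hguard]
    refine iff_of_false (by simp) ?_
    rintro ⟨hu, hinf⟩
    rcases hguard with h | h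
    · exact hu h
    · exact absurd hinf.length_le (by omega)
  · have hu : u ≠ [] := fun h => hguard (Or.inl h)
    have hlen : u.length ≤ s.length := le_of_not_gt fun h => hguard (Or.inr h)
    rw [if_neg hguard]
    rw [pv_aloop_iff s u u.length u.headI s 0 (by simp)]
    obtain ⟨h0, utail, rfl⟩ : ∃ h0 utail, u = h0 :: utail := by
      cases u with
      | nil => exact absurd rfl hu
      | cons a l => exact ⟨a, l, rfl⟩
    constructor
    · rintro ⟨j, _, _, htk⟩
      have hpre : (h0 :: utail) <+: s.drop j := List.prefix_iff_eq_take.mpr htk.symm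
      exact ⟨hu, hpre.isInfix.trans (List.drop_suffix j s).isInfix⟩
    · rintro ⟨_, a, b, hab⟩
      refine ⟨a.length, Nat.zero_le _, ?_, ?_⟩
      · rw [← List.head?_drop, ← hab, List.append_assoc, List.drop_left]
        rfl
      · rw [← hab, List.append_assoc, List.drop_left]
        exact List.take_left (l₁ := h0 :: utail) (l₂ := b)

-- ===== VERDICT (by name: the statement is the Claim_ definition above) =====
theorem contains_token_subsequence_py_spec : Claim_equal_contains_token_subsequence_py := by
  intro s u _dom
  unfold Spec_contains_token_subsequence_py
  exact Bool.coe_iff_coe.mp ((pv_a_iff s u).trans (pv_alt_iff s u).symm)
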